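-- pv_equiv track=rewrite | github.com/SoftDev0208/nesting_algorithm | nesting_visualizer.py | remove_first_n_by_base
-- ===== SOURCE A (Python) =====
-- def remove_first_n_by_base(items, base_id, n):
--     out = []
--     removed = 0
--
--     for item in items:
--         if item["base_id"] == base_id and removed < n:
--             removed += 1
--             continue
--         out.append(item)
--
--     return out
-- ===== SOURCE B (Python) =====
-- def remove_first_n_by_base(items, base_id, n):
--     match_idx = [i for i, item in enumerate(items) if item["base_id"] == base_id]
--     drop = set(match_idx[:max(n, 0)])
--     return [item for i, item in enumerate(items) if i not in drop]
-- ===== Notes on version B (the rewrite author's own statement) =====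
-- stated objective: alternative
-- what changed: Replaces the inline running-removal counter with a two-pass plan: first collect the indices of matching items and take the first max(n,0) as a drop set, then emit the survivors by index.
import Mathlib
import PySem

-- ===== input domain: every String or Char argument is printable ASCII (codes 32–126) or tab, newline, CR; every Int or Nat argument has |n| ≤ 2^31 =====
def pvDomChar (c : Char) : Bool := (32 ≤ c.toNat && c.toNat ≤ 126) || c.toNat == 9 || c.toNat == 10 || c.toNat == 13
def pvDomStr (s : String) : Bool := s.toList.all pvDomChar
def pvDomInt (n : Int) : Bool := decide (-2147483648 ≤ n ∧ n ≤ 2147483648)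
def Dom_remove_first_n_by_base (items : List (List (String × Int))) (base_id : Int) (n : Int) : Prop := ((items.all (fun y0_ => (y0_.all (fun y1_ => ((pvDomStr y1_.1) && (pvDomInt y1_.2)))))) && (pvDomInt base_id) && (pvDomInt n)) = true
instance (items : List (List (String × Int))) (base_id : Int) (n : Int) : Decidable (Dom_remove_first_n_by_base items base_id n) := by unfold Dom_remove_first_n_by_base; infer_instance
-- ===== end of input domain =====

-- B separates "which positions to remove" (the first max(n,0) matching indices) from "emit the
-- survivors", instead of A's inline running-removal counter; alternative decomposition, same cost.

-- item["base_id"] : first value under the key "base_id" (none = KeyError, excluded by Pre_)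
def pvBase? (it : List (String × Int)) : Option Int := (it.find? (fun p => p.1 == "base_id")).map (·.2)

-- ===== PORT A =====
def pvGoA (base_id n : Int) : List (List (String × Int)) → Int → List (List (String × Int))
  | [], _ => []
  | it :: rest, removed =>
    if pvBase? it = some base_id ∧ removed < n then pvGoA base_id n rest (removed + 1)
    else it :: pvGoA base_id n rest removed

def remove_first_n_by_base (items : List (List (String × Int))) (base_id : Int) (n : Int) : List (List (String × Int)) :=
  pvGoA base_id n items 0

-- ===== PORT B =====
def remove_first_n_by_base_alt (items : List (List (String × Int))) (base_id : Int) (n : Int) : List (List (String × Int)) :=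
  let match_idx := ((PySem.List.enumerate items).filter (fun p => pvBase? p.2 == some base_id)).map (·.1)
  -- match_idx[:max(n, 0)] : slice with a nonnegative upper bound = take
  let drop := PySem.Set.ofList (match_idx.take (max n 0).toNat)
  ((PySem.List.enumerate items).filter (fun p => !(drop.contains p.1))).map (·.2)

-- ===== PRECONDITION & SPEC =====
-- Pre_ excludes exactly the inputs where some item lacks the key "base_id", on which A raises KeyError.
def Pre_remove_first_n_by_base (items : List (List (String × Int))) (base_id : Int) (n : Int) : Prop :=
  ∀ it ∈ items, (pvBase? it).isSome
instance (items : List (List (String × Int))) (base_id : Int) (n : Int) : Decidable (Pre_remove_first_n_by_base items base_id n) := by unfold Pre_remove_first_n_by_base; infer_instance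

def pvWitness_remove_first_n_by_base : (List (List (String × Int))) × Int × Int :=
  ([[("base_id", 1)], [("base_id", 2)], [("base_id", 1)]], 1, 1)

def Spec_remove_first_n_by_base (items : List (List (String × Int))) (base_id : Int) (n : Int) (out : List (List (String × Int))) : Prop := out = remove_first_n_by_base_alt items base_id n
instance (items : List (List (String × Int))) (base_id : Int) (n : Int) (out : List (List (String × Int))) : Decidable (Spec_remove_first_n_by_base items base_id n out) := by unfold Spec_remove_first_n_by_base; infer_instance

-- ===== CLAIM (what is proved, stated in full; the proofs are below) =====
def Claim_equal_remove_first_n_by_base : Prop := ∀ (items : List (List (String × Int))) (base_id : Int) (n : Int), Dom_remove_first_n_by_base items base_id n → Pre_remove_first_n_by_base items base_id n → Spec_remove_first_n_by_base items base_id n (remove_first_n_by_base items base_id n)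

-- ===== LEMMAS AND PROOFS =====

-- Common reference: recursion carrying the remaining removal budget as a Nat
def pvRef (base_id : Int) : List (List (String × Int)) → Nat → List (List (String × Int))
  | [], _ => []
  | it :: rest, k =>
    if pvBase? it = some base_id ∧ k ≠ 0 then pvRef base_id rest (k - 1)
    else it :: pvRef base_id rest k

lemma pvGoA_eq_ref (base_id n : Int) (items : List (List (String × Int))) :
    ∀ removed : Int, pvGoA base_id n items removed = pvRef base_id items (n - removed).toNat := by
  induction items with
  | nil => intro removed; rfl
  | cons it rest ih =>
    intro removed
    simp only [pvGoA, pvRef]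
    by_cases hm : pvBase? it = some base_id
    · by_cases hr : removed < n
      · have hk : (n - removed).toNat = (n - (removed + 1)).toNat + 1 := by omega
        simp [hm, hr, hk, ih]
      · have hk : (n - removed).toNat = 0 := by omega
        simp [hm, hr, hk, ih]
    · simp [hm, ih]

lemma pvAlt_core (base_id : Int) (items : List (List (String × Int))) :
    ∀ (o : Int) (k : Nat),
      ((PySem.List.enumerate items o).filter
          (fun p => !decide (p.1 ∈
            ((((PySem.List.enumerate items o).filter (fun p => pvBase? p.2 == some base_id)).map (·.1)).take k)))).map (·.2)
        = pvRef base_id items k := by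
  induction items with
  | nil => intro o k; rfl
  | cons it rest ih =>
    intro o k
    have hM : ∀ i ∈ ((PySem.List.enumerate rest (o + 1)).filter (fun p => pvBase? p.2 == some base_id)).map (·.1), o + 1 ≤ i := by
      intro i hi
      obtain ⟨p, hp, hpi⟩ := List.mem_map.mp hi
      obtain ⟨j, hj, hpe⟩ := (PySem.List.mem_enumerate_iff _ _ _).mp (List.mem_of_mem_filter hp)
      subst hpe; subst hpi; simp
    have hEn : ∀ p ∈ PySem.List.enumerate rest (o + 1), o + 1 ≤ p.1 := by
      intro p hp
      obtain ⟨j, hj, hpe⟩ := (PySem.List.mem_enumerate_iff _ _ _).mp hp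
      subst hpe; simp
    simp only [PySem.List.enumerate_cons, List.filter_cons]
    by_cases hm : pvBase? it = some base_id
    · have hm' : (pvBase? it == some base_id) = true := by simp [hm]
      cases k with
      | zero =>
        simp only [hm', if_true, List.take_zero, List.not_mem_nil, decide_false, Bool.not_false]
        rw [pvRef, if_neg (by simp), ← ih (o + 1) 0]
        simp
      | succ k' =>
        simp only [hm', if_true, List.map_cons, List.take_succ_cons]
        rw [if_neg (by simp)]
        rw [List.filter_congr (l := PySem.List.enumerate rest (o + 1))
          (q := fun p => !decide (p.1 ∈ (((PySem.List.enumerate rest (o + 1)).filter (fun p => pvBase? p.2 == some base_id)).map (·.1)).take k'))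
          (by
            intro p hp
            have hne : p.1 ≠ o := by have := hEn p hp; omega
            simp [List.mem_cons, hne])]
        rw [ih (o + 1) k', pvRef, if_pos ⟨hm, by omega⟩]
        norm_num
    · have hm' : (pvBase? it == some base_id) = false := by simp [hm]
      simp only [hm', Bool.false_eq_true, if_false]
      have ho : (o : Int) ∉ (((PySem.List.enumerate rest (o + 1)).filter (fun p => pvBase? p.2 == some base_id)).map (·.1)).take k := by
        intro h; have := hM o (List.mem_of_mem_take h); omega
      rw [if_pos (by simp [ho]), List.map_cons, ih (o + 1) k, pvRef, if_neg (by simp [hm])]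

lemma pvContains_ofList (L : List Int) (x : Int) :
    (PySem.Set.ofList L).contains x = decide (x ∈ L) := by
  simp [PySem.Set.mem_ofList]

-- ===== VERDICT (by name: the statement is the Claim_ definition above) =====
theorem remove_first_n_by_base_spec : Claim_equal_remove_first_n_by_base := by
  intro items base_id n _ _
  unfold Spec_remove_first_n_by_base remove_first_n_by_base remove_first_n_by_base_alt
  rw [pvGoA_eq_ref]
  have hmax : (max n 0).toNat = (n - 0).toNat := by omega
  rw [← hmax]
  rw [← pvAlt_core base_id items 0 (max n 0).toNat]
  apply congrArg
  apply List.filter_congr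
  intro p _
  rw [pvContains_ofList]
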